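-- pv_equiv track=rewrite | github.com/openxjarvis/clawdbot-python | openclaw/agents/history_utils.py | count_history_turns
-- ===== SOURCE A (Python) =====
-- from typing import Any, Literal
--
-- def count_history_turns(messages: list[dict[str, Any]]) -> int:
--     """
--     Count number of user-assistant turns in history
--
--     Args:
--         messages: Session messages
--
--     Returns:
--         Number of complete turns
--     """
--     turn_count = 0
--     last_role = None
--
--     for msg in messages:
--         role = msg.get("role")
--         if role == "assistant" and last_role == "user":
--             turn_count += 1
--         last_role = role
--
--     return turn_count
-- ===== SOURCE B (Python) =====
-- def count_history_turns(messages: list) -> int: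
--     """
--     Count number of user-assistant turns in history
--     """
--     encoded = "".join(
--         "u" if m.get("role") == "user"
--         else "a" if m.get("role") == "assistant"
--         else "x"
--         for m in messages
--     )
--     return encoded.count("ua")
-- ===== Notes on version B (the rewrite author's own statement) =====
-- stated objective: alternative
-- what changed: Instead of scanning messages with a last_role accumulator, B encodes each message's role as one character ('u'/'a'/'x'), joins them into a string and returns encoded.count("ua") - substring counting replaces the stateful pass (exact because "ua" occurrences cannot overlap).
import Mathlib
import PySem

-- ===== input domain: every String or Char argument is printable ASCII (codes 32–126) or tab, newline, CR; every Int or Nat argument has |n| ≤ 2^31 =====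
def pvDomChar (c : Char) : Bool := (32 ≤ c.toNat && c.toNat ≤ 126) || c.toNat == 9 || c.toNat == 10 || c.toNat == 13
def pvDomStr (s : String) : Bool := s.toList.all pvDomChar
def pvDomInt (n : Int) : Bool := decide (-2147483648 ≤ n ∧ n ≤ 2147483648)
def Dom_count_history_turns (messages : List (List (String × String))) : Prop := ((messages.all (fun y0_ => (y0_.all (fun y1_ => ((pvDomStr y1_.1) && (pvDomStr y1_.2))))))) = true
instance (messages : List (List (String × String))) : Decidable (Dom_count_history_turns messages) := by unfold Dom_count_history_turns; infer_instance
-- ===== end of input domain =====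

-- B encodes each role as one character ('u'/'a'/'x') and counts "ua" substrings instead of A's stateful last_role scan.
-- ===== PORT A =====
-- the for-loop of A: state is (turn_count, last_role); msg.get("role") = first-match lookup
def count_history_turns (messages : List (List (String × String))) : Int :=
  (messages.foldl
    (fun st msg =>
      let role := msg.lookup "role"
      (if role = some "assistant" ∧ st.2 = some "user" then st.1 + 1 else st.1, role))
    ((0 : Int), (none : Option String))).1

-- ===== PORT B =====
-- one character per message: 'u' for user, 'a' for assistant, 'x' otherwise
def pvCharOfMsg (m : List (String × String)) : Char :=
  if m.lookup "role" = some "user" then 'u'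
  else if m.lookup "role" = some "assistant" then 'a'
  else 'x'

-- "".join(... for m in messages) then encoded.count("ua")  (str.count = PySem.Str.count)
def count_history_turns_alt (messages : List (List (String × String))) : Int :=
  let encoded := String.ofList (messages.map pvCharOfMsg)
  ((PySem.Str.count encoded "ua" : Nat) : Int)

-- ===== PRECONDITION & SPEC =====
def Spec_count_history_turns (messages : List (List (String × String))) (out : Int) : Prop := out = count_history_turns_alt messages
instance (messages : List (List (String × String))) (out : Int) : Decidable (Spec_count_history_turns messages out) := by unfold Spec_count_history_turns; infer_instance

-- ===== CLAIM (what is proved, stated in full; the proofs are below) =====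
def Claim_equal_count_history_turns : Prop := ∀ (messages : List (List (String × String))), Dom_count_history_turns messages → Spec_count_history_turns messages (count_history_turns messages)

-- ===== LEMMAS AND PROOFS =====

-- number of adjacent 'u','a' positions in a char list
def pvPairs (cs : List Char) : Nat :=
  (cs.zip cs.tail).countP (fun p => p.1 == 'u' && p.2 == 'a')

theorem pvPairs_nil : pvPairs [] = 0 := rfl
theorem pvPairs_single (c : Char) : pvPairs [c] = 0 := rfl

theorem pvPairs_cons_cons (c d : Char) (t : List Char) :
    pvPairs (c :: d :: t) = (if c = 'u' ∧ d = 'a' then 1 else 0) + pvPairs (d :: t) := by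
  simp only [pvPairs, List.tail_cons, List.zip_cons_cons, List.countP_cons]
  by_cases h : c = 'u' ∧ d = 'a'
  · simp [h.1, h.2]; ring
  · have : ¬ ((c == 'u') && (d == 'a')) = true := by
      simp only [Bool.and_eq_true, beq_iff_eq]; exact h
    simp [this, h]

-- non-overlapping substring search for "ua" counts exactly the adjacent 'u','a' positions
theorem go_eq_pvPairs :
    ∀ (fuel : Nat) (cs : List Char) (acc : Nat), cs.length ≤ fuel →
      PySem.Chars.count.go ['u', 'a'] fuel cs acc = acc + pvPairs cs := by
  intro fuel
  induction fuel with
  | zero =>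
    intro cs acc h
    have : cs = [] := List.eq_nil_of_length_eq_zero (Nat.le_zero.mp h)
    subst this; simp [PySem.Chars.count.go, pvPairs_nil]
  | succ f ih =>
    intro cs acc h
    match cs with
    | [] => simp [PySem.Chars.count.go, pvPairs_nil]
    | c :: t =>
      rw [PySem.Chars.count.go]
      by_cases hp : List.isPrefixOf ['u', 'a'] (c :: t) = true
      · obtain ⟨r, hr⟩ := List.isPrefixOf_iff_prefix.mp hp
        simp only [List.cons_append, List.nil_append] at hr
        injection hr with h1 h2
        subst h2; subst h1
        rw [if_pos hp]
        have hlen : r.length ≤ f := by simp at h; omega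
        rw [show List.drop (['u', 'a'].length) ('u' :: 'a' :: r) = r from rfl,
            ih r (acc + 1) hlen, pvPairs_cons_cons]
        have hA : pvPairs ('a' :: r) = pvPairs r := by
          cases r with
          | nil => rfl
          | cons d t3 => rw [pvPairs_cons_cons]; simp
        rw [hA, if_pos ⟨rfl, rfl⟩]
        omega
      · rw [if_neg hp]
        have hlen : t.length ≤ f := by simp at h; omega
        rw [ih t acc hlen]
        cases t with
        | nil => rfl
        | cons d t2 =>
          rw [pvPairs_cons_cons]
          have : ¬ (c = 'u' ∧ d = 'a') := by
            intro ⟨h1, h2⟩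
            subst h1; subst h2
            exact hp (by simp [List.isPrefixOf])
          simp [this]

-- A's loop equals pvPairs of the encoded roles, generalized over the previous message m
theorem loop_eq (l : List (List (String × String))) :
    ∀ (m : List (String × String)) (tc : Int),
    (l.foldl
      (fun st msg =>
        (if msg.lookup "role" = some "assistant" ∧ st.2 = some "user" then st.1 + 1 else st.1,
          msg.lookup "role"))
      (tc, m.lookup "role")).1
    = tc + (pvPairs (pvCharOfMsg m :: l.map pvCharOfMsg) : Nat) := by
  induction l with
  | nil => intro m tc; simp [pvPairs_single]
  | cons n rest ih =>
    intro m tc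
    simp only [List.foldl_cons, List.map_cons]
    rw [ih n, pvPairs_cons_cons]
    by_cases h : n.lookup "role" = some "assistant" ∧ m.lookup "role" = some "user"
    · have hm : pvCharOfMsg m = 'u' := by simp [pvCharOfMsg, h.2]
      have hn : pvCharOfMsg n = 'a' := by
        have : ¬ n.lookup "role" = some "user" := by rw [h.1]; simp
        simp [pvCharOfMsg, h.1]
      simp [h.1, h.2, hm, hn]
      ring
    · have hcond : ¬ (pvCharOfMsg m = 'u' ∧ pvCharOfMsg n = 'a') := by
        intro ⟨hm, hn⟩
        apply h
        constructor
        · -- pvCharOfMsg n = 'a' forces lookup = some "assistant"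
          by_contra hna
          by_cases hnu : n.lookup "role" = some "user"
          · simp [pvCharOfMsg, hnu] at hn
          · simp [pvCharOfMsg, hnu, hna] at hn
        · by_contra hmu
          by_cases hma : m.lookup "role" = some "assistant"
          · simp [pvCharOfMsg, hma] at hm
          · simp [pvCharOfMsg, hmu, hma] at hm
      simp [if_neg h, hcond]

-- ===== VERDICT (by name: the statement is the Claim_ definition above) =====
theorem count_history_turns_spec : Claim_equal_count_history_turns := by
  intro messages _
  unfold Spec_count_history_turns count_history_turns count_history_turns_alt
  have hcount : ∀ l : List Char, PySem.Str.count (String.ofList l) "ua" = pvPairs l := by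
    intro l
    rw [PySem.Str.count_eq]
    have h1 : (String.ofList l).toList = l := by simp
    have h2 : ("ua" : String).toList = ['u', 'a'] := by decide
    rw [h1, h2]
    unfold PySem.Chars.count
    simpa using go_eq_pvPairs l.length l 0 (le_refl _)
  cases messages with
  | nil => decide
  | cons m rest =>
    simp only [List.foldl_cons]
    have h0 : (if m.lookup "role" = some "assistant" ∧ (none : Option String) = some "user"
        then (0 : Int) + 1 else 0) = 0 := by simp
    rw [h0, loop_eq rest m 0]
    simp only [List.map_cons] at hcount ⊢
    rw [hcount (pvCharOfMsg m :: rest.map pvCharOfMsg)]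
    omega
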